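-- pv_equiv track=rewrite | github.com/guosiyuan/past-CS-projects | cs61a/quiz/quiz1.py | same_hailstone
-- ===== SOURCE A (Python) =====
-- def same_hailstone(a, b):
--     """Return whether a and b are both members of the same hailstone
--     sequence.
--
--     >>> same_hailstone(10, 16) # 10, 5, 16, 8, 4, 2, 1
--     True
--     >>> same_hailstone(16, 10) # order doesn't matter
--     True
--     >>> result = same_hailstone(3, 19) # return, don't print
--     >>> result
--     False
--
--     """
--     assert a>0 and b>0,'arguments should be positive'
--     assert type(a)==int and type(b)==int,'srguments should be integer'
--     x,y=a,b
--     while a!= 1: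
--         if a%2==0:
--             a=a//2
--             if a==b:
--                 return True
--         else:
--             a=3*a+1
--             if a==b:
--                 return True
--     while y!= 1:
--         if y%2==0:
--             y=y//2
--             if y==x:
--                 return True
--         else:
--             y=3*y+1
--             if y==x:
--                 return True
--     return False
-- ===== SOURCE B (Python) =====
-- def same_hailstone(a, b):
--     assert a>0 and b>0,'arguments should be positive'
--     assert type(a)==int and type(b)==int,'srguments should be integer'
--     # one interleaved lockstep walk of both hailstone sequences at once,
--     # instead of two staged loops
--     x, y = a, b
--     while x != 1 or y != 1:
--         if x != 1:
--             x = x // 2 if x % 2 == 0 else 3 * x + 1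
--             if x == b:
--                 return True
--         if y != 1:
--             y = y // 2 if y % 2 == 0 else 3 * y + 1
--             if y == a:
--                 return True
--     return False
-- ===== Notes on version B (the rewrite author's own statement) =====
-- stated objective: alternative
-- what changed: B replaces A's two staged loops (walk a's whole sequence, then walk b's) with a single interleaved lockstep loop that advances both walkers one hailstone step per iteration and tests each fresh value against the other argument; the boolean result is traversal-order independent.
import Mathlib
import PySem

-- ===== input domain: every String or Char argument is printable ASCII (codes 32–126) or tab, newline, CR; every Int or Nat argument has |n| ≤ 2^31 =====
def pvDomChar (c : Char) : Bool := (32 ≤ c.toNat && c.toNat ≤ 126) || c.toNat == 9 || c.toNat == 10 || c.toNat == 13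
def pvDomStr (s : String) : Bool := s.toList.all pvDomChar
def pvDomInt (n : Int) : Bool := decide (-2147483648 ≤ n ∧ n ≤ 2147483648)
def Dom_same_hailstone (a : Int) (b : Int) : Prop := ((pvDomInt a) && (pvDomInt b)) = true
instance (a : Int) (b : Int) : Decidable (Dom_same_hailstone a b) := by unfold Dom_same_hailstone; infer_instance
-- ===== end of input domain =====

-- B walks both hailstone sequences in ONE interleaved lockstep loop instead of A's two staged
-- loops; objective: alternative traversal (order does not matter for the boolean result).
-- Both loops are made total by a fuel bound (pvFuel), far above any hailstone length in Dom.

-- ===== PORT A =====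
def pvFuel : Nat := 100000

-- A's 'while a != 1: step a; if stepped value == b: return True' (first loop; second is (b, a))
def pvLoopA : Nat → Int → Int → Bool
  | 0, _, _ => false
  | f+1, a, b =>
    if a = 1 then false
    else
      let a' := if PySem.Int.mod a 2 = 0 then PySem.Int.floordiv a 2 else 3*a+1
      if a' = b then true else pvLoopA f a' b

def same_hailstone (a : Int) (b : Int) : Bool :=
  if pvLoopA pvFuel a b then true
  else if pvLoopA pvFuel b a then true
  else false

-- ===== PORT B =====
-- B's single loop: 'while x != 1 or y != 1: advance x (if ≠1), test == b; advance y (if ≠1), test == a'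
def pvLock : Nat → Int → Int → Int → Int → Bool
  | 0, _, _, _, _ => false
  | f+1, x, y, a, b =>
    if x = 1 ∧ y = 1 then false
    else
      let x' := if x = 1 then x else (if PySem.Int.mod x 2 = 0 then PySem.Int.floordiv x 2 else 3*x+1)
      if x ≠ 1 ∧ x' = b then true
      else
        let y' := if y = 1 then y else (if PySem.Int.mod y 2 = 0 then PySem.Int.floordiv y 2 else 3*y+1)
        if y ≠ 1 ∧ y' = a then true
        else pvLock f x' y' a b

def same_hailstone_alt (a : Int) (b : Int) : Bool :=
  pvLock pvFuel a b a b

-- ===== PRECONDITION & SPEC =====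
-- A asserts a>0 and b>0 (AssertionError otherwise); Pre_ excludes exactly those raising inputs.
def Pre_same_hailstone (a : Int) (b : Int) : Prop := 0 < a ∧ 0 < b
instance (a : Int) (b : Int) : Decidable (Pre_same_hailstone a b) := by unfold Pre_same_hailstone; infer_instance
def pvWitness_same_hailstone : Int × Int := (10, 16)

def Spec_same_hailstone (a : Int) (b : Int) (out : Bool) : Prop := out = same_hailstone_alt a b
instance (a : Int) (b : Int) (out : Bool) : Decidable (Spec_same_hailstone a b out) := by unfold Spec_same_hailstone; infer_instance

-- ===== CLAIM (what is proved, stated in full; the proofs are below) =====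
def Claim_equal_same_hailstone : Prop := ∀ (a : Int) (b : Int), Dom_same_hailstone a b → Pre_same_hailstone a b → Spec_same_hailstone a b (same_hailstone a b)

-- ===== LEMMAS AND PROOFS =====

theorem pvLoopA_one (f : Nat) (b : Int) : pvLoopA f 1 b = false := by
  cases f <;> simp [pvLoopA]

-- the lockstep walk computes the disjunction of the two staged walks, for every fuel
theorem pvLock_eq_or (f : Nat) (x y a b : Int) :
    pvLock f x y a b = (pvLoopA f x b || pvLoopA f y a) := by
  induction f generalizing x y with
  | zero => simp [pvLock, pvLoopA]
  | succ f ih =>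
    simp only [pvLock, pvLoopA]
    by_cases hx : x = 1 <;> by_cases hy : y = 1 <;>
      simp [hx, hy, ih, pvLoopA_one] <;> split_ifs <;> first | rfl | simp only [Bool.or_assoc, Bool.or_left_comm, Bool.or_comm]

-- ===== VERDICT (by name: the statement is the Claim_ definition above) =====
theorem same_hailstone_spec : Claim_equal_same_hailstone := by
  intro a b _ _
  unfold Spec_same_hailstone same_hailstone same_hailstone_alt
  rw [pvLock_eq_or]
  cases h1 : pvLoopA pvFuel a b <;> cases h2 : pvLoopA pvFuel b a <;> simp
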